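-- pv_equiv track=rewrite | github.com/pypi-data/pypi-mirror-86 | packages/drf-embedded-fields/drf_embedded_fields-0.1.tar.gz/drf_embedded_fields-0.1/drf_embedded_fields/base.py | split_embed_relations
-- ===== SOURCE A (Python) =====
-- def split_embed_relations(embed_fields_list):
--     embed_relations = {}
--     for field in embed_fields_list:
--         field, *field_relations = field.split(".", maxsplit=1)
--         embed_relations.setdefault(field, [])
--         if field_relations:
--             embed_relations[field].append(field_relations[0])
--     return embed_relations
-- ===== SOURCE B (Python) =====
-- def split_embed_relations(embed_fields_list):
--     pairs = [f.split(".", 1) for f in embed_fields_list]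
--     keys = list(dict.fromkeys(p[0] for p in pairs))
--     return {k: [p[1] for p in pairs if p[0] == k and len(p) > 1] for k in keys}
-- ===== Notes on version B (the rewrite author's own statement) =====
-- stated objective: alternative
-- what changed: Replaces A's single pass that mutates a dict (setdefault + in-place append) with a two-phase grouping: split every field once, take the ordered dedup of the prefixes as keys, then build each key's value list by a filter pass over the split pairs.
import Mathlib
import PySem

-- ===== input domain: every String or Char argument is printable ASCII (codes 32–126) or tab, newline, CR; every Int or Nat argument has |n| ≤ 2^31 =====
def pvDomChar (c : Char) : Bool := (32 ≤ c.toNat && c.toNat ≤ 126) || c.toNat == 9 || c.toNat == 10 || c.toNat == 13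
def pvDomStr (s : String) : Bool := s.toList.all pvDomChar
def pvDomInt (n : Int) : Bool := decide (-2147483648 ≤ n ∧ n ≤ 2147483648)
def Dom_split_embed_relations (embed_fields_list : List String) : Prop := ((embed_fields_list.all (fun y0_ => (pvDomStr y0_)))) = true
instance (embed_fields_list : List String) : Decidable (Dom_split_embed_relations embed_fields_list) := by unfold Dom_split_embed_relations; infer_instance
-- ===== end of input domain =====

-- B re-groups the fields in two phases (ordered dedup of prefixes, then one filter pass per
-- prefix) instead of A's single pass mutating a dict; alternative decomposition, not faster.

-- ===== PORT A =====
-- loop body of A: field, *field_relations = field.split(".", maxsplit=1); setdefault; append.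
-- split with a nonempty separator always returns a nonempty list, so the [] branch is unreachable.
def pvStepA (d : PySem.Dict String (List String)) (field0 : String) : PySem.Dict String (List String) :=
  match (PySem.Str.splitMax? field0 "." 1).getD [] with
  | [] => d
  | field :: field_relations =>
    let d' := d.setdefault field []
    match field_relations with
    | [] => d'
    | r :: _ => d'.modify field [] (fun v => v ++ [r])   -- embed_relations[field].append(field_relations[0])

def split_embed_relations (embed_fields_list : List String) : List (String × List String) :=
  (embed_fields_list.foldl pvStepA PySem.Dict.empty).items

-- ===== PORT B =====
-- p[0] / p[1] of a split result: the list is nonempty (and p[1] is only read when len(p) > 1),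
-- so headD "" / getD 1 "" are exact here.
def split_embed_relations_alt (embed_fields_list : List String) : List (String × List String) :=
  let pairs := embed_fields_list.map (fun f => (PySem.Str.splitMax? f "." 1).getD [])
  let keys := PySem.List.dedup (pairs.map (fun p => p.headD ""))
  keys.map (fun k =>
    (k, (pairs.filter (fun p => p.headD "" == k && decide (1 < p.length))).map (fun p => p.getD 1 "")))

-- ===== PRECONDITION & SPEC =====
def Spec_split_embed_relations (embed_fields_list : List String) (out : List (String × List String)) : Prop := out = split_embed_relations_alt embed_fields_list
instance (embed_fields_list : List String) (out : List (String × List String)) : Decidable (Spec_split_embed_relations embed_fields_list out) := by unfold Spec_split_embed_relations; infer_instance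

-- ===== CLAIM (what is proved, stated in full; the proofs are below) =====
def Claim_equal_split_embed_relations : Prop := ∀ (embed_fields_list : List String), Dom_split_embed_relations embed_fields_list → Spec_split_embed_relations embed_fields_list (split_embed_relations embed_fields_list)

-- ===== LEMMAS AND PROOFS =====

-- abbreviations for the proofs
def pvSplit (f : String) : List String := (PySem.Str.splitMax? f "." 1).getD []
def pvKey (f : String) : String := (pvSplit f).headD ""
def pvGather (k : String) (l : List String) : List String :=
  (l.filter (fun f => pvKey f == k)).flatMap (fun f => (pvSplit f).tail)

theorem pvGoLen (sep : List Char) (fuel : Nat) : ∀ (m : Nat) (l cur : List Char) (acc : List (List Char)),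
    acc.length + 1 ≤ (PySem.Chars.splitOnMax.go sep fuel m l cur acc).length ∧
    (PySem.Chars.splitOnMax.go sep fuel m l cur acc).length ≤ acc.length + m + 1 := by
  induction fuel with
  | zero => intro m l cur acc; simp [PySem.Chars.splitOnMax.go]
  | succ fuel ih =>
    intro m l cur acc
    cases l with
    | nil => simp [PySem.Chars.splitOnMax.go]
    | cons c rest =>
      rw [PySem.Chars.splitOnMax.go]
      split_ifs with hm hp
      · simp
      · have := ih (m - 1) (List.drop sep.length (c :: rest)) [] (cur.reverse :: acc)
        simp at this ⊢; omega
      · exact ih m rest (c :: cur) acc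

theorem pvSplit1Chars (cs : List Char) :
    ∃ a rest, PySem.Chars.splitOnMax cs ['.'] 1 = a :: rest ∧ rest.length ≤ 1 := by
  have h := pvGoLen ['.'] (cs.length + 1) 1 cs [] []
  match hre : PySem.Chars.splitOnMax.go ['.'] (cs.length + 1) 1 cs [] [] with
  | [] => rw [hre] at h; simp at h
  | [a] => exact ⟨a, [], by simp [PySem.Chars.splitOnMax, hre], by simp⟩
  | [a, b] => exact ⟨a, [b], by simp [PySem.Chars.splitOnMax, hre], by simp⟩
  | a :: b :: c :: t => rw [hre] at h; simp at h

theorem pvSplitShape (f : String) :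
    ∃ a rest, pvSplit f = a :: rest ∧ rest.length ≤ 1 := by
  obtain ⟨a, rest, he, hl⟩ := pvSplit1Chars f.toList
  refine ⟨String.ofList a, rest.map String.ofList, ?_, by simpa using hl⟩
  simp [pvSplit, PySem.Str.splitMax?, PySem.Chars.splitMax?, he]

theorem pvStepA_keys (d : PySem.Dict String (List String)) (f : String) :
    (pvStepA d f).keys = PySem.Set.add d.keys (pvKey f) := by
  obtain ⟨a, rest, he, hl⟩ := pvSplitShape f
  have hkey : pvKey f = a := by simp [pvKey, he]
  unfold pvStepA
  rw [show (PySem.Str.splitMax? f "." 1).getD [] = a :: rest from he]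
  cases rest with
  | nil =>
    simp only [hkey, PySem.Dict.keys_setdefault, PySem.Set.add, PySem.Dict.contains_iff_mem_keys]
    split_ifs with h1 h2 h2 <;> simp_all [PySem.Set.contains]
  | cons r rest' =>
    simp only [PySem.Dict.keys_modify, hkey]
    rw [PySem.Dict.keys_insert_of_contains _ _ (by simp [PySem.Dict.contains_setdefault])]
    simp only [PySem.Dict.keys_setdefault, PySem.Set.add, PySem.Dict.contains_iff_mem_keys]
    split_ifs with h1 h2 h2 <;> simp_all [PySem.Set.contains]

theorem pvStepA_getD (d : PySem.Dict String (List String)) (f k : String) :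
    (pvStepA d f).getD k [] =
      if pvKey f = k then d.getD k [] ++ (pvSplit f).tail else d.getD k [] := by
  obtain ⟨a, rest, he, hl⟩ := pvSplitShape f
  have hkey : pvKey f = a := by simp [pvKey, he]
  unfold pvStepA
  rw [show (PySem.Str.splitMax? f "." 1).getD [] = a :: rest from he, he, hkey]
  cases rest with
  | nil =>
    by_cases hk : a = k
    · subst hk; simp [PySem.Dict.getD_setdefault_self]
    · simp [hk, PySem.Dict.getD_eq_get?_getD, PySem.Dict.get?_setdefault_of_ne _ _ (Ne.symm hk)]
  | cons r rest' =>
    have : rest' = [] := by simpa using hl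
    subst this
    rw [PySem.Dict.getD_modify]
    by_cases hk : a = k
    · subst hk; simp [PySem.Dict.getD_setdefault_self]
    · simp [hk, Ne.symm hk, PySem.Dict.getD_eq_get?_getD,
        PySem.Dict.get?_setdefault_of_ne _ _ (Ne.symm hk)]

theorem pvFold_keys (l : List String) : ∀ d : PySem.Dict String (List String),
    (l.foldl pvStepA d).keys = PySem.Set.update d.keys (l.map pvKey) := by
  induction l with
  | nil => intro d; simp [PySem.Set.update]
  | cons f l ih =>
    intro d
    simp only [List.foldl_cons, List.map_cons, PySem.Set.update_cons, ih, pvStepA_keys]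

theorem pvFold_getD (l : List String) : ∀ (d : PySem.Dict String (List String)) (k : String),
    (l.foldl pvStepA d).getD k [] = d.getD k [] ++ pvGather k l := by
  induction l with
  | nil => intro d k; simp [pvGather]
  | cons f l ih =>
    intro d k
    simp only [List.foldl_cons, ih, pvStepA_getD, pvGather, List.filter_cons]
    by_cases h : pvKey f = k
    · simp [h]
    · simp [h]

theorem pvValB (l : List String) (k : String) :
    ((l.map pvSplit).filter (fun p => p.headD "" == k && decide (1 < p.length))).map
        (fun p => p.getD 1 "") = pvGather k l := by
  induction l with
  | nil => simp [pvGather]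
  | cons f l ih =>
    obtain ⟨a, rest, he, hl⟩ := pvSplitShape f
    have hkey : pvKey f = a := by simp [pvKey, he]
    simp only [List.map_cons, List.filter_cons, pvGather] at *
    by_cases hk : a = k
    · cases rest with
      | nil => simpa [he, hkey, hk, pvGather] using ih
      | cons r rest' =>
        have : rest' = [] := by simpa using hl
        subst this
        simpa [he, hkey, hk, pvGather] using ih
    · simpa [he, hkey, hk, pvGather] using ih

-- ===== VERDICT (by name: the statement is the Claim_ definition above) =====
theorem split_embed_relations_spec : Claim_equal_split_embed_relations := by
  intro l _
  unfold Spec_split_embed_relations split_embed_relations split_embed_relations_alt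
  have hkeys : (l.foldl pvStepA PySem.Dict.empty).keys = PySem.Set.ofList (l.map pvKey) := by
    rw [pvFold_keys]
    simp [PySem.Dict.keys_empty, PySem.Set.update_nil_left]
  have hnd : (l.foldl pvStepA PySem.Dict.empty).keys.Nodup := by
    rw [hkeys]; exact PySem.Set.nodup_ofList _
  rw [PySem.Dict.items_eq_map_keys _ hnd []]
  rw [hkeys]
  have hBkeys : PySem.List.dedup ((l.map (fun f => (PySem.Str.splitMax? f "." 1).getD [])).map
      (fun p => p.headD "")) = PySem.Set.ofList (l.map pvKey) := by
    rw [PySem.List.dedup_eq_ofList, List.map_map]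
    rfl
  dsimp only
  rw [hBkeys]
  apply List.map_congr_left
  intro k _
  have h1 := pvFold_getD l PySem.Dict.empty k
  have h2 := pvValB l k
  simp only [PySem.Dict.getD_empty, List.nil_append] at h1
  rw [h1]
  have h3 : (fun f => (PySem.Str.splitMax? f "." 1).getD []) = pvSplit := rfl
  rw [h3, h2]
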